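-- pv_equiv track=rewrite | github.com/AliceInWonderland61/spring2025-python | Week2/week-2-S2-P2.py | is_valid_itinerary
-- ===== SOURCE A (Python) =====
-- def is_valid_itinerary(itinerary):
--     # so if i understand correctly, the biggest number in the itineratry needs to appear twice
--     #created a dictionary to count how many times each city appears in the itinerary
--     dictionary={}
--     for i in itinerary:
--         if i in dictionary:
--             dictionary[i] += 1
--         else:
--             dictionary[i] = 1
--
--     #created a counter to make sure that no cities appear more than twice
--     #if the largest city appears more than twice, then we return false
--     count=0
--     for i in dictionary:
--         # i should probably count how many cities have a count of 2
--         if dictionary[i]==2: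
--             count+=1
--
--     # Check if the largest city appears exactly twice
--     max_city = max(dictionary.keys())
--     if dictionary[max_city] != 2:
--         return False
--
--     if count==1:
--         return True
--     else:
--         return False
-- ===== SOURCE B (Python) =====
-- def is_valid_itinerary(itinerary):
--     # One pass over the sorted list, grouping runs of equal cities:
--     # count runs of length exactly 2 and keep the length of the last
--     # (= maximum city's) run.
--     pairs = 0
--     run = 0
--     prev = None
--     for x in sorted(itinerary):
--         if run > 0 and x == prev:
--             run += 1
--         else:
--             if run == 2:
--                 pairs += 1
--             run = 1
--             prev = x
--     if run == 2:
--         pairs += 1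
--     return run == 2 and pairs == 1
-- ===== Notes on version B (the rewrite author's own statement) =====
-- stated objective: alternative
-- what changed: Replaced the dict-counter plus key-scan plus max() with a single scan over sorted(itinerary) that groups runs of equal cities, counting runs of length exactly 2 and using the last run as the maximum city's count.
-- outside the precondition, e.g. on is_valid_itinerary([]): A raises ValueError, B returns False
import Mathlib
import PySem

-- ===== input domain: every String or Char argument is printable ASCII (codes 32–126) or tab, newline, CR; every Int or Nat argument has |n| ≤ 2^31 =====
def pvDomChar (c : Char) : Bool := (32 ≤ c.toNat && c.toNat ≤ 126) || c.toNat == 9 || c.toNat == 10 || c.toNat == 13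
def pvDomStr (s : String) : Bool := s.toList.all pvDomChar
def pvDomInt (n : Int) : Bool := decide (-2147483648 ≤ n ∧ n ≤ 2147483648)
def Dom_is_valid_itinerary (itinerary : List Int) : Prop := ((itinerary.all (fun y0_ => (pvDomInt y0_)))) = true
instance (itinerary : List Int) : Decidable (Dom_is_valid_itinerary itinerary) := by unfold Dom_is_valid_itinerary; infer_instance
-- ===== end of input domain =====

-- B replaces A's dict counter + key scan + max() by one grouping scan over sorted(itinerary); equivalence is about the return value only.

-- ===== PORT A =====
def is_valid_itinerary (itinerary : List Int) : Bool :=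
  let d : PySem.Dict Int Int := itinerary.foldl
    (fun d i => if d.contains i then d.insert i (d.getD i 0 + 1) else d.insert i 1)
    PySem.Dict.empty
  let count : Int := d.keys.foldl (fun c i => if d.getD i 0 == 2 then c + 1 else c) 0
  match PySem.List.max? d.keys (fun y => y) with
  | none => false   -- Python: max() raises ValueError here; excluded by Pre_
  | some max_city =>
    if !(d.getD max_city 0 == 2) then false
    else if count == 1 then true else false

-- ===== PORT B =====
-- loop body of B: state = (pairs, run, prev)
def pvAltStep (st : Nat × Nat × Option Int) (x : Int) : Nat × Nat × Option Int :=
  if decide (0 < st.2.1) && (st.2.2 == some x) then (st.1, (st.2.1 + 1, st.2.2))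
  else ((if st.2.1 == 2 then st.1 + 1 else st.1), (1, some x))

def is_valid_itinerary_alt (itinerary : List Int) : Bool :=
  let st := (PySem.List.sorted itinerary (fun v => v) false).foldl pvAltStep (0, (0, none))
  let pairs := if st.2.1 == 2 then st.1 + 1 else st.1
  (st.2.1 == 2) && (pairs == 1)

-- ===== PRECONDITION & SPEC =====
-- Pre_ excludes only the empty list, on which Python A raises ValueError (max() of an empty sequence).
def Pre_is_valid_itinerary (itinerary : List Int) : Prop := itinerary ≠ []
instance (itinerary : List Int) : Decidable (Pre_is_valid_itinerary itinerary) := by unfold Pre_is_valid_itinerary; infer_instance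
def pvWitness_is_valid_itinerary : List Int := [3, 1, 3]

def Spec_is_valid_itinerary (itinerary : List Int) (out : Bool) : Prop := out = is_valid_itinerary_alt itinerary
instance (itinerary : List Int) (out : Bool) : Decidable (Spec_is_valid_itinerary itinerary out) := by unfold Spec_is_valid_itinerary; infer_instance

-- ===== CLAIM (what is proved, stated in full; the proofs are below) =====
def Claim_equal_is_valid_itinerary : Prop := ∀ (itinerary : List Int), Dom_is_valid_itinerary itinerary → Pre_is_valid_itinerary itinerary → Spec_is_valid_itinerary itinerary (is_valid_itinerary itinerary)

-- ===== LEMMAS AND PROOFS =====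

-- number of distinct cities occurring exactly twice
def pvDpairs (l : List Int) : Nat := (PySem.Set.ofList l).countP (fun k => l.count k == 2)
-- the maximum city (the 0 default is irrelevant: only used on nonempty lists)
def pvMax (l : List Int) : Int := (PySem.List.max? l (fun y => y)).getD 0
-- common closed form of both programs on nonempty input
def pvPhi (l : List Int) : Bool := (l.count (pvMax l) == 2) && (pvDpairs l == 1)
-- B's finalisation of the loop state (pairs, run, prev)
def pvFin (st : Nat × Nat × Option Int) : Bool :=
  (st.2.1 == 2) && ((if st.2.1 == 2 then st.1 + 1 else st.1) == 1)

theorem pvMax_eq (l : List Int) (m : Int) (hm : m ∈ l) (hmax : ∀ x ∈ l, x ≤ m) :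
    PySem.List.max? l (fun y => y) = some m := by
  cases hq : PySem.List.max? l (fun y => y) with
  | none =>
    rw [(PySem.List.max?_eq_none_iff l (fun y => y)).mp hq] at hm
    exact absurd hm (List.not_mem_nil)
  | some m' =>
    have h1 := PySem.List.max?_isMax hq m hm
    have h2 := hmax m' (PySem.List.max?_mem hq)
    exact congrArg some (le_antisymm h2 h1)

theorem pvMaxVal (l : List Int) (m : Int) (hm : m ∈ l) (hmax : ∀ x ∈ l, x ≤ m) :
    pvMax l = m := by rw [pvMax, pvMax_eq l m hm hmax]; rfl

-- a nodup list whose members are exactly {a} is [a]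
theorem pvSingleton (l : List Int) (a : Int) (hn : l.Nodup) (hm : ∀ x, x ∈ l ↔ x = a) :
    l = [a] := by
  cases l with
  | nil => exact absurd ((hm a).2 rfl) (List.not_mem_nil)
  | cons b t =>
    have hb : b = a := (hm b).1 (by simp)
    subst hb
    cases t with
    | nil => rfl
    | cons c u =>
      have hc : c = b := (hm c).1 (by simp)
      simp [hc] at hn

theorem pvSetReplicate (r : Nat) (a : Int) (hr : 0 < r) :
    PySem.Set.ofList (List.replicate r a) = [a] := by
  apply pvSingleton _ _ (PySem.Set.nodup_ofList _)
  intro x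
  rw [PySem.Set.mem_ofList]
  simp [List.mem_replicate]
  omega

theorem pvSetCons (a : Int) (s : List Int) (r : Nat) (ha : a ∉ s) (hr : 0 < r) :
    (PySem.Set.ofList (List.replicate r a ++ s)).Perm (a :: PySem.Set.ofList s) := by
  apply List.perm_of_nodup_nodup_toFinset_eq (PySem.Set.nodup_ofList _)
  · simp [PySem.Set.nodup_ofList]
    intro h; exact ha h
  · ext x
    simp [List.mem_toFinset, PySem.Set.mem_ofList, List.mem_replicate, List.mem_append]
    constructor
    · rintro (⟨_, rfl⟩ | h) ; exact Or.inl rfl; exact Or.inr h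
    · rintro (rfl | h); exact Or.inl ⟨by omega, rfl⟩; exact Or.inr h

-- main loop invariant over the (sorted) remainder
theorem pvLoop (s : List Int) (hs : s.Pairwise (· ≤ ·)) :
    ∀ (p r : Nat) (a : Int), 0 < r → (∀ x ∈ s, a ≤ x) →
    pvFin (s.foldl pvAltStep (p, (r, some a))) =
      ((((List.replicate r a ++ s).count (pvMax (List.replicate r a ++ s))) == 2) &&
       ((p + pvDpairs (List.replicate r a ++ s)) == 1)) := by
  induction s with
  | nil =>
    intro p r a hr _
    have hmx : pvMax (List.replicate r a ++ []) = a := by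
      apply pvMaxVal
      · simp [List.mem_replicate]; omega
      · intro x hx; simp [List.mem_replicate] at hx; omega
    rw [hmx]
    simp only [List.foldl_nil, List.append_nil, pvFin, pvDpairs, pvSetReplicate r a hr,
      List.count_replicate_self]
    by_cases h2 : r = 2 <;> simp [h2]
  | cons b t ih =>
    intro p r a hr hle
    have hab : a ≤ b := hle b (by simp)
    by_cases hba : b = a
    · subst hba
      have hstep : pvAltStep (p, (r, some b)) b = (p, (r + 1, some b)) := by
        simp [pvAltStep, hr]
      rw [List.foldl_cons, hstep,
        ih (List.Pairwise.of_cons hs) p (r + 1) b (by omega)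
          (fun x hx => List.rel_of_pairwise_cons hs hx)]
      have : List.replicate r b ++ b :: t = List.replicate (r + 1) b ++ t := by
        simp [List.replicate_succ']
      rw [this]
    · have hlt : a < b := lt_of_le_of_ne hab (fun e => hba e.symm)
      have hne : (some a == some b) = false := by
        simp; exact fun e => hba e.symm
      have hstep : pvAltStep (p, (r, some a)) b =
          ((if r == 2 then p + 1 else p), (1, some b)) := by
        simp [pvAltStep, hne]
      have htgt : ∀ x ∈ b :: t, a < x := by
        intro x hx
        cases hx with
        | head => exact hlt
        | tail _ hx => exact lt_of_lt_of_le hlt (List.rel_of_pairwise_cons hs hx)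
      have hnotin : a ∉ b :: t := fun h => absurd (htgt a h) (lt_irrefl a)
      rw [List.foldl_cons, hstep,
        ih (List.Pairwise.of_cons hs) _ 1 b (by omega)
          (fun x hx => List.rel_of_pairwise_cons hs hx)]
      -- replicate 1 b ++ t = b :: t
      have h1 : List.replicate 1 b ++ t = b :: t := by simp [List.replicate]
      rw [h1]
      -- max of the full list equals max of b :: t
      have hmx : pvMax (List.replicate r a ++ b :: t) = pvMax (b :: t) := by
        have hm' : pvMax (b :: t) ∈ b :: t := by
          cases hq : PySem.List.max? (b :: t) (fun y => y) with
          | none => simp [PySem.List.max?_eq_none_iff] at hq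
          | some m => simpa [pvMax, hq] using PySem.List.max?_mem hq
        have hmax' : ∀ x ∈ b :: t, x ≤ pvMax (b :: t) := by
          intro x hx
          cases hq : PySem.List.max? (b :: t) (fun y => y) with
          | none => simp [PySem.List.max?_eq_none_iff] at hq
          | some m => simpa [pvMax, hq] using PySem.List.max?_isMax hq x hx
        apply pvMaxVal
        · simp [hm']
        · intro x hx
          rcases List.mem_append.1 hx with hx | hx
          · simp [List.mem_replicate] at hx
            calc x = a := hx.2
            _ ≤ b := hab
            _ ≤ _ := hmax' b (by simp)
          · exact hmax' x hx
      rw [hmx]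
      -- count of the max over the full list equals over b :: t
      have hmne : pvMax (b :: t) ≠ a := by
        have : b ≤ pvMax (b :: t) := by
          cases hq : PySem.List.max? (b :: t) (fun y => y) with
          | none => simp [PySem.List.max?_eq_none_iff] at hq
          | some m => simpa [pvMax, hq] using PySem.List.max?_isMax hq b (by simp)
        omega
      have hcnt : (List.replicate r a ++ b :: t).count (pvMax (b :: t)) =
          (b :: t).count (pvMax (b :: t)) := by
        simp [List.count_append, List.count_replicate]
        intro h; exact absurd h.symm hmne
      rw [hcnt]
      -- pairs: dpairs full = (if r == 2 then 1 else 0) + dpairs (b :: t)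
      have hdp : pvDpairs (List.replicate r a ++ b :: t) =
          (if r == 2 then 1 else 0) + pvDpairs (b :: t) := by
        unfold pvDpairs
        rw [List.Perm.countP_eq _ (pvSetCons a (b :: t) r hnotin hr)]
        rw [List.countP_cons]
        have hca : (List.replicate r a ++ b :: t).count a = r := by
          simp [List.count_append, List.count_replicate_self,
            List.count_eq_zero_of_not_mem hnotin]
        have hcongr : (PySem.Set.ofList (b :: t)).countP
              (fun k => (List.replicate r a ++ b :: t).count k == 2) =
            (PySem.Set.ofList (b :: t)).countP (fun k => (b :: t).count k == 2) := by
          apply List.countP_congr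
          intro x hx
          have hxm : x ∈ b :: t := (PySem.Set.mem_ofList _ _).1 hx
          have hxa : x ≠ a := fun e => hnotin (e ▸ hxm)
          simp [List.count_append, List.count_replicate, Ne.symm hxa]
        rw [hcongr, hca]
        by_cases h2 : r = 2 <;> simp [h2] <;> omega
      rw [hdp]
      by_cases h2 : r = 2 <;> by_cases hc : ((b :: t).count (pvMax (b :: t)) == 2) = true <;>
        simp [h2, hc] <;> omega

theorem pvMax_spec (l : List Int) (h : l ≠ []) :
    pvMax l ∈ l ∧ ∀ x ∈ l, x ≤ pvMax l := by
  cases hq : PySem.List.max? l (fun y => y) with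
  | none => exact absurd ((PySem.List.max?_eq_none_iff l (fun y => y)).mp hq) h
  | some m =>
    refine ⟨by simpa [pvMax, hq] using PySem.List.max?_mem hq, fun x hx => ?_⟩
    simpa [pvMax, hq] using PySem.List.max?_isMax hq x hx

theorem pvMax_perm (l l' : List Int) (hp : l.Perm l') (h : l' ≠ []) : pvMax l = pvMax l' := by
  obtain ⟨hm, hmax⟩ := pvMax_spec l' h
  exact pvMaxVal l (pvMax l') (hp.mem_iff.2 hm) (fun x hx => hmax x (hp.mem_iff.1 hx))

theorem pvDpairs_perm (l l' : List Int) (hp : l.Perm l') : pvDpairs l = pvDpairs l' := by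
  unfold pvDpairs
  have hsp : (PySem.Set.ofList l).Perm (PySem.Set.ofList l') := by
    apply List.perm_of_nodup_nodup_toFinset_eq (PySem.Set.nodup_ofList _) (PySem.Set.nodup_ofList _)
    ext x
    simp [List.mem_toFinset, hp.mem_iff]
  rw [List.Perm.countP_eq _ hsp]
  apply List.countP_congr
  intro x _
  rw [hp.count_eq]

theorem pvPhi_perm (l l' : List Int) (hp : l.Perm l') (h : l' ≠ []) : pvPhi l = pvPhi l' := by
  unfold pvPhi
  rw [pvMax_perm l l' hp h, hp.count_eq, pvDpairs_perm l l' hp]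

-- step 1: the counting loop builds the Counter
theorem pvDictEq (xs : List Int) :
    xs.foldl (fun (d : PySem.Dict Int Int) i =>
        if d.contains i then d.insert i (d.getD i 0 + 1) else d.insert i 1)
      PySem.Dict.empty = PySem.Dict.counter xs := by
  rw [← PySem.Dict.foldl_insert_getD_add_one_eq_counter]
  congr 1
  funext d i
  split_ifs with h
  · rfl
  · rw [PySem.Dict.getD_of_not_contains d 0 (by simpa using h), zero_add]

theorem pvA_eq_phi (xs : List Int) (h : xs ≠ []) : is_valid_itinerary xs = pvPhi xs := by
  unfold is_valid_itinerary
  rw [pvDictEq]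
  simp only [PySem.Dict.getD_counter, PySem.Dict.keys_counter]
  rw [PySem.List.foldl_if_add_one]
  have hmem : pvMax xs ∈ PySem.Set.ofList xs := by
    rw [PySem.Set.mem_ofList]
    have hne : PySem.List.max? xs (fun y => y) ≠ none := by
      simp [PySem.List.max?_eq_none_iff, h]
    cases hq : PySem.List.max? xs (fun y => y) with
    | none => exact absurd hq hne
    | some m => simpa [pvMax, hq] using PySem.List.max?_mem hq
  have hmax : ∀ x ∈ PySem.Set.ofList xs, x ≤ pvMax xs := by
    intro x hx
    rw [PySem.Set.mem_ofList] at hx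
    cases hq : PySem.List.max? xs (fun y => y) with
    | none => simp [PySem.List.max?_eq_none_iff] at hq; simp [hq] at hx
    | some m => simpa [pvMax, hq] using PySem.List.max?_isMax hq x hx
  rw [pvMax_eq _ _ hmem hmax]
  simp only [pvPhi, pvDpairs]
  have hcast : ∀ (c : Nat), ((c : Int) == 2) = (c == 2) := by
    intro c; simp; omega
  rw [hcast]
  have hcp : (PySem.Set.ofList xs).countP (fun i => (xs.count i : Int) == 2)
      = (PySem.Set.ofList xs).countP (fun k => xs.count k == 2) := by
    apply List.countP_congr; intro x _; simp [hcast]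
  cases h2 : (xs.count (pvMax xs) == 2) <;> cases h1 : (pvDpairs xs == 1) <;>
    simp_all [pvDpairs, beq_iff_eq]

theorem pvB_eq_phi (xs : List Int) (h : xs ≠ []) : is_valid_itinerary_alt xs = pvPhi xs := by
  have hperm := PySem.List.sorted_perm xs (fun v => v) false
  have hpw := PySem.List.sorted_pairwise xs (fun v => v)
  cases hso : PySem.List.sorted xs (fun v => v) false with
  | nil => exact absurd ((PySem.List.sorted_eq_nil_iff xs (fun v => v) false).1 hso) h
  | cons b t =>
    rw [hso] at hperm hpw
    have hB : is_valid_itinerary_alt xs = pvFin ((b :: t).foldl pvAltStep (0, (0, none))) := by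
      unfold is_valid_itinerary_alt pvFin
      rw [hso]
    have hstep : pvAltStep (0, (0, none)) b = (0, (1, some b)) := by simp [pvAltStep]
    rw [hB, List.foldl_cons, hstep,
      pvLoop t hpw.of_cons 0 1 b (by omega) (fun x hx => List.rel_of_pairwise_cons hpw hx)]
    have h1 : List.replicate 1 b ++ t = b :: t := by simp [List.replicate]
    rw [h1]
    simp only [Nat.zero_add]
    exact pvPhi_perm (b :: t) xs hperm h

-- ===== VERDICT (by name: the statement is the Claim_ definition above) =====
theorem is_valid_itinerary_spec : Claim_equal_is_valid_itinerary := by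
  intro xs _ hpre
  unfold Spec_is_valid_itinerary
  rw [pvA_eq_phi xs hpre, pvB_eq_phi xs hpre]
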